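-- pv_equiv track=rewrite | github.com/rosenrose/cos_pro | python/3차 1급 4_initial_code.py | solution
-- ===== SOURCE A (Python) =====
-- def solution(s1, s2):
--     s1_len = len(s1)
--     s2_len = len(s2)
--     common_len = 0
--
--     for length in range(1, min(s1_len, s2_len) + 1):
--         s1_prefix = s1[:length]
--         s2_suffix = s2[-length:]
--
--         if s1_prefix == s2_suffix:
--             common_len = length
--
--         s2_prefix = s2[:length]
--         s1_suffix = s1[-length:]
--
--         if s2_prefix == s1_suffix:
--             common_len = length
--
--     answer = s1_len + s2_len - common_len
--
--     return answer
-- ===== SOURCE B (Python) =====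
-- def _overlap(a, b):
--     # Longest L with a[:L] == b[len(b)-L:], computed in O(len(a)+len(b)) via the
--     # KMP prefix function of a + '\0' + b ('\0' occurs in neither input string on
--     # the stated printable-ASCII domain, so borders of the combined string are
--     # exactly prefix-of-a = suffix-of-b overlaps).
--     s = a + "\0" + b
--     pi = [0] * len(s)
--     k = 0
--     for i in range(1, len(s)):
--         while k > 0 and s[i] != s[k]:
--             k = pi[k - 1]
--         if s[i] == s[k]:
--             k += 1
--         pi[i] = k
--     return pi[-1]
--
-- def solution(s1, s2):
--     return len(s1) + len(s2) - max(_overlap(s1, s2), _overlap(s2, s1))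
-- ===== Notes on version B (the rewrite author's own statement) =====
-- stated objective: faster
-- what changed: A brute-forces every overlap length with quadratic slice comparisons; B computes each direction's longest overlap in linear time as the KMP prefix-function value of s1+'\0'+s2 (and s2+'\0'+s1).
import Mathlib
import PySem

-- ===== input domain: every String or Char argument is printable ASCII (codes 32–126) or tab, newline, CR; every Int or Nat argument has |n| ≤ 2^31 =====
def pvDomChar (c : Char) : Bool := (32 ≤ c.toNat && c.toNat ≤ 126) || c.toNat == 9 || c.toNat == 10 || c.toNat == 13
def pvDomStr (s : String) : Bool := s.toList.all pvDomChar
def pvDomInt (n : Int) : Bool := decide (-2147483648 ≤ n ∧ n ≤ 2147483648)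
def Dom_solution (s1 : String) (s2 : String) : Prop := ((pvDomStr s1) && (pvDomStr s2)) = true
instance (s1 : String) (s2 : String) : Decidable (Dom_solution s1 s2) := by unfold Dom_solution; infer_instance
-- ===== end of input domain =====

-- B replaces A's quadratic brute force over all overlap lengths (slice comparisons) with the
-- linear-time KMP prefix function of s1+'\0'+s2 (and s2+'\0'+s1), whose final value is each
-- direction's longest overlap; the separator is outside the stated printable-ASCII domain.


-- ===== PORT A =====
-- Literal port of A: for length in range(1, min+1), slices compared exactly as in Python
-- (strings handled on the .toList side, PySem.List.slice = Python slicing).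
def solution (s1 : String) (s2 : String) : Int :=
  let l1 := s1.toList
  let l2 := s2.toList
  let s1_len : Int := l1.length
  let s2_len : Int := l2.length
  let common_len :=
    (PySem.List.pyRange 1 (min s1_len s2_len + 1) 1).foldl
      (fun common_len length =>
        let c1 := if PySem.List.slice l1 none (some length) =
                     PySem.List.slice l2 (some (-length)) none then length else common_len
        if PySem.List.slice l2 none (some length) =
           PySem.List.slice l1 (some (-length)) none then length else c1) 0
  s1_len + s2_len - common_len

-- ===== PORT B =====
-- B's inner while-loop `while k > 0 and s[i] != s[k]: k = pi[k-1]`; the fuel argument only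
-- makes the recursion structural (k strictly decreases, so fuel = i never runs out).
def kmpChase (s : List Char) (pi : List Nat) (c : Char) : Nat → Nat → Nat
  | 0, k => k
  | fuel+1, k =>
      if k ≠ 0 ∧ ¬ (s.getD k ' ' = c) then kmpChase s pi c fuel (pi.getD (k-1) 0) else k

-- one iteration of B's `for i in range(1, len(s))` body
def kmpStep (s : List Char) (st : List Nat × Nat) (i : Nat) : List Nat × Nat :=
  let k1 := kmpChase s st.1 (s.getD i ' ') i st.2
  let k2 := if s.getD i ' ' = s.getD k1 ' ' then k1 + 1 else k1
  (st.1.set i k2, k2)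

-- pi = [0]*len(s); for i in range(1, len(s)): …
def kmpPis (s : List Char) : List Nat :=
  ((List.range' 1 (s.length - 1)).foldl (kmpStep s) (List.replicate s.length 0, 0)).1

-- _overlap(a, b) = prefix-function value at the end of a + '\0' + b
def overlapK (a b : List Char) : Nat :=
  let s := a ++ Char.ofNat 0 :: b
  (kmpPis s).getD (s.length - 1) 0

def solution_alt (s1 : String) (s2 : String) : Int :=
  let l1 := s1.toList
  let l2 := s2.toList
  (l1.length : Int) + (l2.length : Int)
    - ((max (overlapK l1 l2) (overlapK l2 l1) : Nat) : Int)

-- ===== PRECONDITION & SPEC =====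
def Spec_solution (s1 : String) (s2 : String) (out : Int) : Prop := out = solution_alt s1 s2
instance (s1 : String) (s2 : String) (out : Int) : Decidable (Spec_solution s1 s2 out) := by unfold Spec_solution; infer_instance

-- ===== CLAIM (what is proved, stated in full; the proofs are below) =====
def Claim_equal_solution : Prop := ∀ (s1 : String) (s2 : String), Dom_solution s1 s2 → Spec_solution s1 s2 (solution s1 s2)

-- ===== LEMMAS AND PROOFS =====

-- maxBorder p: the longest proper border of p (longest L < |p| with p.take L = p-suffix of length L)
def mb (p : List Char) : Nat :=
  Nat.findGreatest (fun L => p.take L = p.drop (p.length - L)) (p.length - 1)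

theorem bord_zero (p : List Char) : p.take 0 = p.drop (p.length - 0) := by simp

theorem mb_bord (p : List Char) : p.take (mb p) = p.drop (p.length - mb p) := by
  unfold mb
  exact Nat.findGreatest_spec (P := fun L => p.take L = p.drop (p.length - L))
    (Nat.zero_le _) (bord_zero p)

theorem mb_le (p : List Char) : mb p ≤ p.length - 1 := by unfold mb; exact Nat.findGreatest_le _

theorem le_mb (p : List Char) (L : Nat) (hL : L ≤ p.length - 1)
    (h : p.take L = p.drop (p.length - L)) : L ≤ mb p := by
  unfold mb; exact Nat.le_findGreatest hL h

theorem getD_take (s : List Char) (i L : Nat) (h : L < i) (d : Char) :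
    (s.take i).getD L d = s.getD L d := by
  simp only [List.getD_eq_getElem?_getD, h, List.getElem?_take_of_lt]

-- borders of p ++ [c] of positive length are exactly extensions of matching borders of p
theorem border_ext (p : List Char) (c : Char) (L : Nat) (hL : L < p.length) :
    ((p ++ [c]).take (L+1) = (p ++ [c]).drop ((p ++ [c]).length - (L+1))) ↔
      (p.take L = p.drop (p.length - L) ∧ p.getD L ' ' = c) := by
  have hlen : (p ++ [c]).length = p.length + 1 := by simp
  have h1 : (p ++ [c]).take (L+1) = p.take L ++ [p.getD L ' '] := by
    rw [List.take_append]
    have : L + 1 - p.length = 0 := by omega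
    rw [this, List.take_zero, List.append_nil, List.take_add_one]
    have : p[L]? = some (p.getD L ' ') := by
      simp [List.getD_eq_getElem?_getD, List.getElem?_eq_getElem hL]
    rw [this]
    rfl
  have h2 : (p ++ [c]).drop ((p ++ [c]).length - (L+1)) = p.drop (p.length - L) ++ [c] := by
    rw [hlen]
    have e : p.length + 1 - (L + 1) = p.length - L := by omega
    rw [e, List.drop_append]
    have : p.length - L - p.length = 0 := by omega
    rw [this, List.drop_zero]
  rw [h1, h2]
  constructor
  · intro h
    have hl : (p.take L).length = (p.drop (p.length - L)).length := by
      rw [List.length_take, List.length_drop]; omega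
    have := List.append_inj h (by rw [List.length_take, List.length_drop]; omega)
    exact ⟨this.1, by simpa using this.2⟩
  · rintro ⟨h1', h2'⟩
    rw [h1', h2']

-- restriction of a border question to a shorter border-or-full prefix
theorem border_shrink (p : List Char) (m L : Nat)
    (hm : p.take m = p.drop (p.length - m)) (hmp : m ≤ p.length) (hL : L ≤ m) :
    (p.take L = p.drop (p.length - L)) ↔ ((p.take m).take L = (p.take m).drop (m - L)) := by
  have e1 : (p.take m).take L = p.take L := by
    rw [List.take_take, Nat.min_eq_left hL]
  have e2 : (p.take m).drop (m - L) = p.drop (p.length - L) := by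
    rw [hm, List.drop_drop]
    congr 1
    omega
  rw [e1, e2]

-- correctness of the failure-link chase
theorem chase_spec (s : List Char) (pi : List Nat) (i : Nat) (hi : i < s.length)
    (Hpi : ∀ j, j < i → pi.getD j 0 = mb (s.take (j+1))) :
    ∀ fuel k, k ≤ fuel → k < i →
      ((s.take i).take k = (s.take i).drop (i - k)) →
      (∀ L, L < i → (s.take i).take L = (s.take i).drop (i - L) →
          s.getD L ' ' = s.getD i ' ' → L ≤ k) →
      (kmpChase s pi (s.getD i ' ') fuel k) ≤ k ∧
      ((s.take i).take (kmpChase s pi (s.getD i ' ') fuel k) =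
        (s.take i).drop (i - (kmpChase s pi (s.getD i ' ') fuel k))) ∧
      (∀ L, L < i → (s.take i).take L = (s.take i).drop (i - L) →
          s.getD L ' ' = s.getD i ' ' → L ≤ kmpChase s pi (s.getD i ' ') fuel k) ∧
      (s.getD (kmpChase s pi (s.getD i ' ') fuel k) ' ' = s.getD i ' '
        ∨ kmpChase s pi (s.getD i ' ') fuel k = 0) := by
  intro fuel
  induction fuel with
  | zero =>
    intro k hk hki hb hcand
    have hk0 : k = 0 := Nat.le_zero.mp hk
    subst hk0
    exact ⟨Nat.le_refl 0, hb, hcand, Or.inr rfl⟩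
  | succ fuel ih =>
    intro k hk hki hb hcand
    rw [show kmpChase s pi (s.getD i ' ') (fuel+1) k
        = if k ≠ 0 ∧ ¬ (s.getD k ' ' = s.getD i ' ')
          then kmpChase s pi (s.getD i ' ') fuel (pi.getD (k-1) 0) else k from rfl]
    by_cases hcond : k ≠ 0 ∧ ¬ (s.getD k ' ' = s.getD i ' ')
    · rw [if_pos hcond]
      obtain ⟨hk0, hmis⟩ := hcond
      have hk1 : 1 ≤ k := Nat.pos_of_ne_zero hk0
      have hkd : pi.getD (k-1) 0 = mb (s.take k) := by
        have h' := Hpi (k-1) (by omega)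
        rwa [Nat.sub_add_cancel hk1] at h'
      have hlp : (s.take i).length = i := by rw [List.length_take]; omega
      have hlk : (s.take k).length = k := by rw [List.length_take]; omega
      have hkk : (s.take i).take k = s.take k := by
        rw [List.take_take, Nat.min_eq_left (Nat.le_of_lt hki)]
      have hk'le : pi.getD (k-1) 0 ≤ k - 1 := by
        rw [hkd]
        have h' := mb_le (s.take k)
        omega
      have hb' : (s.take i).take k = (s.take i).drop ((s.take i).length - k) := by
        rw [hlp]; exact hb
      have hiff : ∀ L, L ≤ k →
          ((s.take i).take L = (s.take i).drop (i - L)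
            ↔ (s.take k).take L = (s.take k).drop (k - L)) := by
        intro L hLk
        have h' := border_shrink (s.take i) k L hb' (by rw [hlp]; omega) hLk
        rw [hkk, hlp] at h'
        exact h'
      have hbk' : (s.take k).take (pi.getD (k-1) 0)
          = (s.take k).drop (k - pi.getD (k-1) 0) := by
        have h' := mb_bord (s.take k)
        rw [hlk] at h'
        rw [hkd]
        exact h'
      have hbnew : (s.take i).take (pi.getD (k-1) 0)
          = (s.take i).drop (i - pi.getD (k-1) 0) :=
        (hiff _ (by omega)).mpr hbk'
      have hcand' : ∀ L, L < i → (s.take i).take L = (s.take i).drop (i - L) →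
          s.getD L ' ' = s.getD i ' ' → L ≤ pi.getD (k-1) 0 := by
        intro L hLi hbL hcL
        have hLk : L ≤ k := hcand L hLi hbL hcL
        have hLne : L ≠ k := by rintro rfl; exact hmis hcL
        have hbL2 : (s.take k).take L = (s.take k).drop (k - L) := (hiff L hLk).mp hbL
        have hbL3 : (s.take k).take L = (s.take k).drop ((s.take k).length - L) := by
          rw [hlk]; exact hbL2
        have := le_mb (s.take k) L (by rw [hlk]; omega) hbL3
        rw [hkd]
        exact this
      have hres := ih (pi.getD (k-1) 0) (by omega) (by omega) hbnew hcand'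
      exact ⟨Nat.le_trans hres.1 (by omega), hres.2.1, hres.2.2.1, hres.2.2.2⟩
    · rw [if_neg hcond]
      push Not at hcond
      refine ⟨Nat.le_refl k, hb, hcand, ?_⟩
      by_cases hk0 : k = 0
      · exact Or.inr hk0
      · exact Or.inl (hcond hk0)

-- one step of the main loop computes the prefix-function value at i
theorem kmpStep_mb (s : List Char) (pi : List Nat) (k i : Nat) (hi : i < s.length) (hi0 : 0 < i)
    (Hpi : ∀ j, j < i → pi.getD j 0 = mb (s.take (j+1)))
    (hk : k = mb (s.take i)) :
    (if s.getD i ' ' = s.getD (kmpChase s pi (s.getD i ' ') i k) ' '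
      then kmpChase s pi (s.getD i ' ') i k + 1
      else kmpChase s pi (s.getD i ' ') i k) = mb (s.take (i+1)) := by
  have hlp : (s.take i).length = i := by rw [List.length_take]; omega
  have hlp1 : (s.take (i+1)).length = i + 1 := by rw [List.length_take]; omega
  have hki : k < i := by
    rw [hk]
    have h' := mb_le (s.take i)
    omega
  have hb : (s.take i).take k = (s.take i).drop (i - k) := by
    rw [hk]
    have h' := mb_bord (s.take i)
    rw [hlp] at h'
    exact h'
  have hcand : ∀ L, L < i → (s.take i).take L = (s.take i).drop (i - L) →
      s.getD L ' ' = s.getD i ' ' → L ≤ k := by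
    intro L hLi hbL _
    rw [hk]
    exact le_mb (s.take i) L (by rw [hlp]; omega) (by rw [hlp]; exact hbL)
  obtain ⟨hr1, hr2, hr3, hr4⟩ :=
    chase_spec s pi i hi Hpi i k (Nat.le_of_lt hki) hki hb hcand
  set r := kmpChase s pi (s.getD i ' ') i k with hrdef
  have hri : r < i := Nat.lt_of_le_of_lt hr1 hki
  have htake1 : s.take (i+1) = s.take i ++ [s.getD i ' '] := by
    rw [List.take_add_one]
    congr 1
    simp [List.getElem?_eq_getElem hi, List.getD_eq_getElem?_getD]
  by_cases hmatch : s.getD i ' ' = s.getD r ' '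
  · rw [if_pos hmatch]
    apply Nat.le_antisymm
    · apply le_mb
      · omega
      · rw [htake1]
        exact (border_ext (s.take i) (s.getD i ' ') r (by omega)).mpr
          ⟨by rw [hlp]; exact hr2, by rw [getD_take s i r hri]; exact hmatch.symm⟩
    · rcases Nat.eq_zero_or_pos (mb (s.take (i+1))) with h0 | hpos
      · omega
      · obtain ⟨L, hL⟩ : ∃ L, mb (s.take (i+1)) = L + 1 :=
          ⟨mb (s.take (i+1)) - 1, by omega⟩
        have hMle := mb_le (s.take (i+1))
        have hLi : L < i := by omega
        have hMb := mb_bord (s.take (i+1))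
        rw [hL, htake1] at hMb
        obtain ⟨hbL, hcL⟩ :=
          (border_ext (s.take i) (s.getD i ' ') L (by omega)).mp hMb
        have : L ≤ r := hr3 L hLi (by rw [hlp] at hbL; exact hbL)
          (by rw [getD_take s i L hLi] at hcL; exact hcL)
        omega
  · rw [if_neg hmatch]
    have hr0 : r = 0 := by
      rcases hr4 with h | h
      · exact absurd h.symm hmatch
      · exact h
    rcases Nat.eq_zero_or_pos (mb (s.take (i+1))) with h0 | hpos
    · omega
    · obtain ⟨L, hL⟩ : ∃ L, mb (s.take (i+1)) = L + 1 :=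
        ⟨mb (s.take (i+1)) - 1, by omega⟩
      have hMle := mb_le (s.take (i+1))
      have hLi : L < i := by omega
      have hMb := mb_bord (s.take (i+1))
      rw [hL, htake1] at hMb
      obtain ⟨hbL, hcL⟩ :=
        (border_ext (s.take i) (s.getD i ' ') L (by omega)).mp hMb
      have hLr : L ≤ r := hr3 L hLi (by rw [hlp] at hbL; exact hbL)
        (by rw [getD_take s i L hLi] at hcL; exact hcL)
      have hL0 : L = 0 := by omega
      subst hL0
      rw [getD_take s i 0 (by omega)] at hcL
      rw [hr0] at hmatch
      exact absurd hcL.symm hmatch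

theorem kmpFold_inv (s : List Char) (hs : s ≠ []) : ∀ t, t ≤ s.length - 1 →
    ((List.range' 1 t).foldl (kmpStep s) (List.replicate s.length 0, 0)).1.length = s.length ∧
    ((List.range' 1 t).foldl (kmpStep s) (List.replicate s.length 0, 0)).2 = mb (s.take (t+1)) ∧
    (∀ j, j ≤ t →
      ((List.range' 1 t).foldl (kmpStep s) (List.replicate s.length 0, 0)).1.getD j 0
        = mb (s.take (j+1))) := by
  have hpos : 0 < s.length := List.length_pos_of_ne_nil hs
  have hmb1 : mb (s.take 1) = 0 := by
    have h1 : (s.take 1).length - 1 = 0 := by rw [List.length_take]; omega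
    unfold mb
    rw [h1]
    exact Nat.findGreatest_zero
  intro t
  induction t with
  | zero =>
    intro _
    refine ⟨by simp, by simpa using hmb1.symm, ?_⟩
    intro j hj
    have hj0 : j = 0 := Nat.le_zero.mp hj
    subst hj0
    simp [hmb1]
  | succ t ih =>
    intro ht
    have ht' : t ≤ s.length - 1 := by omega
    obtain ⟨iha, ihb, ihc⟩ := ih ht'
    have hrange : List.range' 1 (t+1) = List.range' 1 t ++ [t+1] := by
      rw [List.range'_concat]
      simp [Nat.add_comm]
    rw [hrange, List.foldl_append]
    have hi : t + 1 < s.length := by omega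
    have Hpi : ∀ j, j < t+1 →
        ((List.range' 1 t).foldl (kmpStep s) (List.replicate s.length 0, 0)).1.getD j 0
          = mb (s.take (j+1)) := fun j hj => ihc j (by omega)
    have hkey := kmpStep_mb s
      ((List.range' 1 t).foldl (kmpStep s) (List.replicate s.length 0, 0)).1
      ((List.range' 1 t).foldl (kmpStep s) (List.replicate s.length 0, 0)).2
      (t+1) hi (by omega) Hpi ihb
    simp only [List.foldl_cons, List.foldl_nil]
    refine ⟨?_, ?_, ?_⟩
    · simp [kmpStep, List.length_set, iha]
    · simp only [kmpStep]
      exact hkey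
    · intro j hj
      simp only [kmpStep]
      by_cases hje : j = t + 1
      · subst hje
        have hlt : t + 1 <
            ((List.range' 1 t).foldl (kmpStep s) (List.replicate s.length 0, 0)).1.length := by
          rw [iha]; exact hi
        rw [List.getD_eq_getElem?_getD, List.getElem?_set, if_pos rfl, if_pos hlt]
        simpa using hkey
      · have hjt : j ≤ t := by omega
        rw [List.getD_eq_getElem?_getD, List.getElem?_set, if_neg (by omega)]
        rw [← List.getD_eq_getElem?_getD]
        exact ihc j hjt

theorem kmpPis_last (s : List Char) (hs : s ≠ []) :
    (kmpPis s).getD (s.length - 1) 0 = mb s := by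
  have hpos : 0 < s.length := List.length_pos_of_ne_nil hs
  obtain ⟨_, _, hc⟩ := kmpFold_inv s hs (s.length - 1) (Nat.le_refl _)
  have h := hc (s.length - 1) (Nat.le_refl _)
  have hlen : s.length - 1 + 1 = s.length := by omega
  rw [hlen, List.take_length] at h
  unfold kmpPis
  exact h

theorem findGreatest_congr (P Q : Nat → Prop) [DecidablePred P] [DecidablePred Q]
    (m n : Nat) (hmn : m ≤ n) (hP0 : P 0) (hQ0 : Q 0)
    (h : ∀ k, k ≤ n → (P k ↔ (k ≤ m ∧ Q k))) :
    Nat.findGreatest P n = Nat.findGreatest Q m := by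
  apply Nat.le_antisymm
  · have hx : P (Nat.findGreatest P n) := Nat.findGreatest_spec (Nat.zero_le _) hP0
    have := (h _ (Nat.findGreatest_le n)).mp hx
    exact Nat.le_findGreatest this.1 this.2
  · have hy : Q (Nat.findGreatest Q m) := Nat.findGreatest_spec (Nat.zero_le _) hQ0
    have hym : Nat.findGreatest Q m ≤ m := Nat.findGreatest_le m
    exact Nat.le_findGreatest (Nat.le_trans hym hmn)
      ((h _ (Nat.le_trans hym hmn)).mpr ⟨hym, hy⟩)

theorem findGreatest_or (P Q : Nat → Prop) [DecidablePred P] [DecidablePred Q]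
    (n : Nat) (hP0 : P 0) (hQ0 : Q 0) :
    Nat.findGreatest (fun k => P k ∨ Q k) n
      = max (Nat.findGreatest P n) (Nat.findGreatest Q n) := by
  apply Nat.le_antisymm
  · have hx : P (Nat.findGreatest (fun k => P k ∨ Q k) n) ∨
        Q (Nat.findGreatest (fun k => P k ∨ Q k) n) :=
      Nat.findGreatest_spec (P := fun k => P k ∨ Q k) (Nat.zero_le _) (Or.inl hP0)
    rcases hx with hx | hx
    · exact Nat.le_trans (Nat.le_findGreatest (Nat.findGreatest_le n) hx) (Nat.le_max_left _ _)
    · exact Nat.le_trans (Nat.le_findGreatest (Nat.findGreatest_le n) hx) (Nat.le_max_right _ _)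
  · apply Nat.max_le.mpr
    constructor
    · exact Nat.le_findGreatest (Nat.findGreatest_le n)
        (Or.inl (Nat.findGreatest_spec (Nat.zero_le _) hP0))
    · exact Nat.le_findGreatest (Nat.findGreatest_le n)
        (Or.inr (Nat.findGreatest_spec (Nat.zero_le _) hQ0))

-- the maximal border of a ++ '\0' ++ b is the maximal prefix-of-a/suffix-of-b overlap
theorem mb_sep (a b : List Char) (ha : Char.ofNat 0 ∉ a) (hb : Char.ofNat 0 ∉ b) :
    mb (a ++ Char.ofNat 0 :: b)
      = Nat.findGreatest (fun L => a.take L = b.drop (b.length - L)) (min a.length b.length) := by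
  have hlen : (a ++ Char.ofNat 0 :: b).length = a.length + b.length + 1 := by
    simp
    omega
  unfold mb
  apply findGreatest_congr
  · omega
  · exact bord_zero _
  · simp
  · intro k hk
    rw [hlen] at hk ⊢
    constructor
    · intro hP
      have hka : k ≤ a.length := by
        by_contra h'
        have hka : a.length < k := Nat.lt_of_not_le h'
        have hq := congrArg (fun l => l[a.length]?) hP
        simp only [] at hq
        rw [List.getElem?_take_of_lt hka, List.getElem?_drop] at hq
        rw [List.getElem?_append_right (Nat.le_refl a.length), Nat.sub_self,
          List.getElem?_cons_zero] at hq
        rw [List.getElem?_append_right (by omega :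
          a.length ≤ a.length + b.length + 1 - k + a.length)] at hq
        have e2 : a.length + b.length + 1 - k + a.length - a.length
            = (a.length + b.length - k) + 1 := by omega
        rw [e2, List.getElem?_cons_succ] at hq
        exact hb (List.mem_of_getElem? hq.symm)
      have hkb : k ≤ b.length := by
        by_contra h'
        have hkb : b.length < k := Nat.lt_of_not_le h'
        have hidx : k - b.length - 1 < k := by omega
        have hq := congrArg (fun l => l[k - b.length - 1]?) hP
        simp only [] at hq
        rw [List.getElem?_take_of_lt hidx, List.getElem?_drop] at hq
        rw [List.getElem?_append_left (by omega : k - b.length - 1 < a.length)] at hq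
        have e2 : a.length + b.length + 1 - k + (k - b.length - 1) = a.length := by omega
        rw [e2, List.getElem?_append_right (Nat.le_refl a.length), Nat.sub_self,
          List.getElem?_cons_zero] at hq
        exact ha (List.mem_of_getElem? hq)
      have e1 : (a ++ Char.ofNat 0 :: b).take k = a.take k := by
        rw [List.take_append]
        have h0 : k - a.length = 0 := by omega
        rw [h0, List.take_zero, List.append_nil]
      have e2 : (a ++ Char.ofNat 0 :: b).drop (a.length + b.length + 1 - k)
          = b.drop (b.length - k) := by
        rw [List.drop_append,
          List.drop_eq_nil_of_le (by omega : a.length ≤ a.length + b.length + 1 - k),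
          List.nil_append]
        have e3 : a.length + b.length + 1 - k - a.length = (b.length - k) + 1 := by omega
        rw [e3, List.drop_succ_cons]
      rw [e1, e2] at hP
      exact ⟨by omega, hP⟩
    · rintro ⟨hkm, hQ⟩
      have e1 : (a ++ Char.ofNat 0 :: b).take k = a.take k := by
        rw [List.take_append]
        have h0 : k - a.length = 0 := by omega
        rw [h0, List.take_zero, List.append_nil]
      have e2 : (a ++ Char.ofNat 0 :: b).drop (a.length + b.length + 1 - k)
          = b.drop (b.length - k) := by
        rw [List.drop_append,
          List.drop_eq_nil_of_le (by omega : a.length ≤ a.length + b.length + 1 - k),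
          List.nil_append]
        have e3 : a.length + b.length + 1 - k - a.length = (b.length - k) + 1 := by omega
        rw [e3, List.drop_succ_cons]
      rw [e1, e2]
      exact hQ

-- A's ascending fold keeps the greatest matching length: it is Nat.findGreatest of the disjunction
theorem foldA_eq_fg (l1 l2 : List Char) (m : Nat) :
    (PySem.List.pyRange 1 ((m : Int) + 1) 1).foldl
      (fun common_len length =>
        let c1 := if PySem.List.slice l1 none (some length) =
                     PySem.List.slice l2 (some (-length)) none then length else common_len
        if PySem.List.slice l2 none (some length) =
           PySem.List.slice l1 (some (-length)) none then length else c1) 0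
    = ((Nat.findGreatest
          (fun L => l1.take L = l2.drop (l2.length - L) ∨ l2.take L = l1.drop (l1.length - L))
          m : Nat) : Int) := by
  induction m with
  | zero =>
    rw [PySem.List.pyRange_one_eq_nil (by omega)]
    simp
  | succ m ih =>
    have hsplit := PySem.List.pyRange_one_succ_right (a := 1) (b := (m : Int) + 1) (by omega)
    have hcast : ((m : Int) + 1 + 1) = (((m + 1 : Nat) : Int) + 1) := by push_cast; ring
    rw [hcast] at hsplit
    rw [hsplit, List.foldl_append, ih]
    simp only [List.foldl_cons, List.foldl_nil]
    rw [show ((m : Int) + 1) = ((m + 1 : Nat) : Int) from by push_cast; ring]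
    have hk : (0 : Nat) < m + 1 := Nat.succ_pos m
    rw [PySem.List.slice_to_natCast l1 (m+1), PySem.List.slice_from_neg_natCast l2 (m+1) hk,
        PySem.List.slice_to_natCast l2 (m+1), PySem.List.slice_from_neg_natCast l1 (m+1) hk]
    rw [Nat.findGreatest_succ]
    by_cases h1 : l1.take (m+1) = l2.drop (l2.length - (m+1)) <;>
      by_cases h2 : l2.take (m+1) = l1.drop (l1.length - (m+1)) <;>
      simp [h1, h2]

theorem sep_not_mem (s : String) (h : pvDomStr s = true) : Char.ofNat 0 ∉ s.toList := by
  intro hmem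
  have := List.all_eq_true.mp h _ hmem
  simp [pvDomChar] at this

-- ===== VERDICT (by name: the statement is the Claim_ definition above) =====
theorem solution_spec : Claim_equal_solution := by
  intro s1 s2 hdom
  have hdom' : pvDomStr s1 = true ∧ pvDomStr s2 = true := by
    unfold Dom_solution at hdom
    simpa [Bool.and_eq_true] using hdom
  have ha := sep_not_mem s1 hdom'.1
  have hb := sep_not_mem s2 hdom'.2
  unfold Spec_solution solution solution_alt
  have hmin : min ((s1.toList.length : Int)) ((s2.toList.length : Int))
      = ((min s1.toList.length s2.toList.length : Nat) : Int) := by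
    simp [Nat.cast_min]
  simp only [hmin]
  rw [foldA_eq_fg s1.toList s2.toList (min s1.toList.length s2.toList.length)]
  have hor := findGreatest_or
    (fun L => s1.toList.take L = s2.toList.drop (s2.toList.length - L))
    (fun L => s2.toList.take L = s1.toList.drop (s1.toList.length - L))
    (min s1.toList.length s2.toList.length)
    (by simp) (by simp)
  rw [hor]
  have h1 : Nat.findGreatest
      (fun L => s1.toList.take L = s2.toList.drop (s2.toList.length - L))
      (min s1.toList.length s2.toList.length) = overlapK s1.toList s2.toList := by
    rw [← mb_sep s1.toList s2.toList ha hb]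
    unfold overlapK
    exact (kmpPis_last _ (by simp)).symm
  have h2 : Nat.findGreatest
      (fun L => s2.toList.take L = s1.toList.drop (s1.toList.length - L))
      (min s1.toList.length s2.toList.length) = overlapK s2.toList s1.toList := by
    rw [Nat.min_comm, ← mb_sep s2.toList s1.toList hb ha]
    unfold overlapK
    exact (kmpPis_last _ (by simp)).symm
  rw [h1, h2]
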